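-- pv_equiv track=rewrite | github.com/msg43/Knowledge_Chipper | src/knowledge_system/utils/obsidian_tags.py | format_obsidian_tags_section
-- ===== SOURCE A (Python) =====
-- def format_obsidian_tags_section(hashtags: set[str]) -> str:
--     """
--     Format a set of hashtags into a clean tags section for Obsidian.
--
--     Args:
--         hashtags: Set of hashtag strings (including #)
--
--     Returns:
--         Formatted tags section
--     """
--     if not hashtags:
--         return ""
--
--     # Sort tags for consistency
--     sorted_tags = sorted(hashtags)
--
--     # Group tags by category if they use forward slash notation
--     categorized = {}
--     uncategorized = []
--
--     for tag in sorted_tags: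
--         if "/" in tag:
--             category = tag.split("/")[0]
--             if category not in categorized:
--                 categorized[category] = []
--             categorized[category].append(tag)
--         else:
--             uncategorized.append(tag)
--
--     # Format output
--     result_parts = []
--
--     # Add uncategorized tags first
--     if uncategorized:
--         result_parts.append(" ".join(uncategorized))
--
--     # Add categorized tags
--     for category in sorted(categorized.keys()):
--         result_parts.append(" ".join(categorized[category]))
--
--     return " ".join(result_parts)
-- ===== SOURCE B (Python) =====
-- def format_obsidian_tags_section(hashtags: set[str]) -> str:
--     """Single keyed sort: uncategorized tags (flag 0) first, ordered by tag;
--     then categorized tags ordered by (category, tag)."""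
--     def key(t):
--         if "/" in t:
--             return (1, t.split("/")[0], t)
--         return (0, "", t)
--     return " ".join(sorted(hashtags, key=key))
-- ===== Notes on version B (the rewrite author's own statement) =====
-- stated objective: simpler
-- what changed: Replaces the explicit dict-grouping pass plus per-category re-join with a single sort by the composite key (uncategorized-flag, category, tag) followed by one join; no empty-input guard or intermediate dict/list state is needed.
import Mathlib
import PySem

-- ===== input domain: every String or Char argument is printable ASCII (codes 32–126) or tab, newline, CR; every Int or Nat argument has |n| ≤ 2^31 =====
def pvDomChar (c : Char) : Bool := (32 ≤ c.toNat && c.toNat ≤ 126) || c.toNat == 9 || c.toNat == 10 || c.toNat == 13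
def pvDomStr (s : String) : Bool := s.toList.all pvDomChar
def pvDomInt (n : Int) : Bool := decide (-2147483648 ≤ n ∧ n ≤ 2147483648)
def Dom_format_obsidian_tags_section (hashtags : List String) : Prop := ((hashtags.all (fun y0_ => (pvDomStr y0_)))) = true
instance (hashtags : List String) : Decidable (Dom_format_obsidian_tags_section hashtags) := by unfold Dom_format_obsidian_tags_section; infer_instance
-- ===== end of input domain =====

-- B replaces A's dict-grouping and per-category joins by one sort under the composite key
-- (uncategorized-flag, category, tag) followed by a single join (objective: simpler).


-- ===== PORT A =====
-- tag.split("/")[0]: split? is some (sep "/" ≠ "") and never returns some [], so .getD/.headD are exact here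
def catOf (t : String) : String := ((PySem.Str.split? t "/").getD []).headD ""

def format_obsidian_tags_section (hashtags : List String) : String :=
  if hashtags = [] then ""
  else
    let sorted_tags := PySem.List.sorted hashtags (fun x => x) false
    -- 'if category not in categorized: categorized[category] = []; categorized[category].append(tag)'
    -- is exactly Dict.modify category [] (· ++ [tag])  (d[k] = f(d.get(k, [])))
    let st := sorted_tags.foldl
      (fun (s : PySem.Dict String (List String) × List String) tag =>
        if PySem.Str.isIn "/" tag then
          (s.1.modify (catOf tag) [] (· ++ [tag]), s.2)
        else
          (s.1, s.2 ++ [tag]))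
      (PySem.Dict.empty, [])
    let categorized := st.1
    let uncategorized := st.2
    let result_parts : List String :=
      if uncategorized ≠ [] then [PySem.Str.join " " uncategorized] else []
    let result_parts := (PySem.List.sorted categorized.keys (fun x => x) false).foldl
      (fun acc category => acc ++ [PySem.Str.join " " (categorized.getD category [])])
      result_parts
    PySem.Str.join " " result_parts

-- ===== PORT B =====
-- Python's tuple key (flag, category, tag): the (flag, category) part is the lexicographic
-- pair Lex (Int × String), the trailing tag component is sorted2's second key
def bigKey (t : String) : Lex (Int × String) :=
  if PySem.Str.isIn "/" t then toLex (1, catOf t) else toLex (0, "")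

def format_obsidian_tags_section_alt (hashtags : List String) : String :=
  PySem.Str.join " " (PySem.List.sorted2 hashtags bigKey (fun t => t) false)

-- ===== PRECONDITION & SPEC =====
def Spec_format_obsidian_tags_section (hashtags : List String) (out : String) : Prop := out = format_obsidian_tags_section_alt hashtags
instance (hashtags : List String) (out : String) : Decidable (Spec_format_obsidian_tags_section hashtags out) := by unfold Spec_format_obsidian_tags_section; infer_instance

-- ===== CLAIM (what is proved, stated in full; the proofs are below) =====
def Claim_equal_format_obsidian_tags_section : Prop := ∀ (hashtags : List String), Dom_format_obsidian_tags_section hashtags → Spec_format_obsidian_tags_section hashtags (format_obsidian_tags_section hashtags)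

-- ===== LEMMAS AND PROOFS =====

-- proof-side abbreviations
def pvSlash (t : String) : Bool := PySem.Str.isIn "/" t
def pvUN (s0 : List String) : List String := s0.filter (fun t => !pvSlash t)
def pvSL (s0 : List String) : List String := s0.filter pvSlash
def pvCats (s0 : List String) : List String := PySem.Set.ofList ((pvSL s0).map catOf)
def pvBucket (s0 : List String) (c : String) : List String := (pvSL s0).filter (fun t => catOf t == c)
def pvGroups (s0 : List String) : List (List String) :=
  (if pvUN s0 = [] then [] else [pvUN s0]) ++
    (PySem.List.sorted (pvCats s0) (fun x => x) false).map (pvBucket s0)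
def pvK (t : String) : Lex (Lex (Int × String) × String) := toLex (bigKey t, t)

-- A's code computes the join of the per-group joins
def pvStep (s : PySem.Dict String (List String) × List String) (tag : String) :
    PySem.Dict String (List String) × List String :=
  if PySem.Str.isIn "/" tag then (s.1.modify (catOf tag) [] (· ++ [tag]), s.2)
  else (s.1, s.2 ++ [tag])
def pvFD (d : PySem.Dict String (List String)) (tag : String) : PySem.Dict String (List String) :=
  if pvSlash tag then d.modify (catOf tag) [] (· ++ [tag]) else d
def pvFU (u : List String) (tag : String) : List String :=
  if pvSlash tag then u else u ++ [tag]

theorem pv_fold_pair (s0 : List String) :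
    s0.foldl pvStep (PySem.Dict.empty, []) = (s0.foldl pvFD PySem.Dict.empty, s0.foldl pvFU []) := by
  have hstep : pvStep = (fun s tag => (pvFD s.1 tag, pvFU s.2 tag)) := by
    funext s tag
    unfold pvStep pvFD pvFU pvSlash
    split_ifs <;> rfl
  rw [hstep]
  exact PySem.List.foldl_prod_mk pvFD pvFU s0 _ _

theorem pv_fold_un (s0 : List String) : s0.foldl pvFU [] = pvUN s0 := by
  have hg : pvFU = (fun u tag => if (!pvSlash tag) = true then u ++ [tag] else u) := by
    funext u tag; unfold pvFU; by_cases hc : pvSlash tag <;> simp [hc]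
  rw [hg, PySem.List.foldl_append_if_eq_filter]
  rfl

theorem pv_fold_keys (s0 : List String) : (s0.foldl pvFD PySem.Dict.empty).keys = pvCats s0 := by
  have h1 : s0.foldl pvFD PySem.Dict.empty
      = (pvSL s0).foldl (fun d tag => d.modify (catOf tag) [] (· ++ [tag])) PySem.Dict.empty := by
    unfold pvFD
    exact PySem.List.foldl_if_eq_foldl_filter pvSlash _ s0 _
  rw [h1]
  have h2 := PySem.Dict.keys_foldl_modify_key (pvSL s0) catOf ([] : List String)
      (fun _ tag => (· ++ [tag])) PySem.Dict.empty
  rw [h2, PySem.Dict.keys_empty, PySem.Set.update_nil_left]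
  rfl

theorem pv_fold_getD (s0 : List String) (c : String) :
    (s0.foldl pvFD PySem.Dict.empty).getD c [] = pvBucket s0 c := by
  have h1 : s0.foldl pvFD PySem.Dict.empty
      = (pvSL s0).foldl (fun d tag => d.modify (catOf tag) [] (· ++ [tag])) PySem.Dict.empty := by
    unfold pvFD
    exact PySem.List.foldl_if_eq_foldl_filter pvSlash _ s0 _
  have h2 : (pvSL s0).foldl (fun d tag => d.modify (catOf tag) [] (· ++ [tag])) PySem.Dict.empty
      = ((pvSL s0).map (fun t => (catOf t, t))).foldl
          (fun d p => d.modify p.1 [] (· ++ [p.2])) PySem.Dict.empty := by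
    rw [List.foldl_map]
  rw [h1, h2, PySem.Dict.getD_foldl_modify_append, PySem.Dict.getD_empty, List.filter_map]
  simp [pvBucket, List.map_map, Function.comp_def]

theorem pvA_eq (hashtags : List String) (h : hashtags ≠ []) :
    format_obsidian_tags_section hashtags =
      PySem.Str.join " "
        ((pvGroups (PySem.List.sorted hashtags (fun x => x) false)).map (PySem.Str.join " ")) := by
  unfold format_obsidian_tags_section
  rw [if_neg h]
  show PySem.Str.join " "
      ((PySem.List.sorted
          ((PySem.List.sorted hashtags (fun x => x) false).foldl pvStep (PySem.Dict.empty, [])).1.keys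
          (fun x => x) false).foldl
        (fun acc category => acc ++
          [PySem.Str.join " "
            (((PySem.List.sorted hashtags (fun x => x) false).foldl pvStep (PySem.Dict.empty, [])).1.getD category [])])
        (if ((PySem.List.sorted hashtags (fun x => x) false).foldl pvStep (PySem.Dict.empty, [])).2 ≠ [] then
          [PySem.Str.join " " (((PySem.List.sorted hashtags (fun x => x) false).foldl pvStep (PySem.Dict.empty, [])).2)]
         else [])) = _
  rw [pv_fold_pair]
  simp only [pv_fold_un, pv_fold_keys, pv_fold_getD]
  rw [PySem.List.foldl_append_singleton_eq_map]
  congr 1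
  unfold pvGroups
  rw [List.map_append, List.map_map]
  congr 1
  split_ifs with h1 h2 <;> simp_all

-- join of joins = join of the flattened groups (all groups nonempty), Chars level
theorem pv_chars_join_append (sep : List Char) (xs ys : List (List Char)) (hx : xs ≠ []) (hy : ys ≠ []) :
    PySem.Chars.join sep (xs ++ ys) = PySem.Chars.join sep xs ++ sep ++ PySem.Chars.join sep ys := by
  induction xs with
  | nil => exact absurd rfl hx
  | cons a xs ih =>
    cases xs with
    | nil =>
      cases ys with
      | nil => exact absurd rfl hy
      | cons b ys => simp [PySem.Chars.join_cons_cons, PySem.Chars.join_singleton]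
    | cons a' xs' =>
      rw [List.cons_append, List.cons_append, PySem.Chars.join_cons_cons,
          PySem.Chars.join_cons_cons, ← List.cons_append, ih (by simp)]
      simp [List.append_assoc]

theorem pv_chars_join_flatten (sep : List Char) (groups : List (List (List Char)))
    (h : ∀ g ∈ groups, g ≠ []) :
    PySem.Chars.join sep (groups.map (PySem.Chars.join sep)) = PySem.Chars.join sep groups.flatten := by
  induction groups with
  | nil => simp [PySem.Chars.join_nil]
  | cons g gs ih =>
    cases gs with
    | nil => simp [PySem.Chars.join_singleton]
    | cons g' gs' =>
      have hg : g ≠ [] := h g (by simp)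
      have hrest : (g' :: gs').flatten ≠ [] := by
        have : g' ≠ [] := h g' (by simp)
        cases g' with
        | nil => exact absurd rfl this
        | cons c cs => simp
      simp only [List.map_cons]
      rw [PySem.Chars.join_cons_cons, ← List.map_cons, ih (fun x hx => h x (by simp [hx]))]
      conv_rhs => rw [List.flatten_cons]
      rw [pv_chars_join_append sep g (g' :: gs').flatten hg hrest]

theorem pv_str_join_flatten (sep : String) (groups : List (List String))
    (h : ∀ g ∈ groups, g ≠ []) :
    PySem.Str.join sep (groups.map (PySem.Str.join sep)) = PySem.Str.join sep groups.flatten := by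
  apply String.toList_inj.mp
  rw [PySem.Str.toList_join, PySem.Str.toList_join]
  have h1 : (groups.map (PySem.Str.join sep)).map String.toList
      = (groups.map (List.map String.toList)).map (PySem.Chars.join sep.toList) := by
    rw [List.map_map, List.map_map]
    exact List.map_congr_left (fun g _ => PySem.Str.toList_join sep g)
  rw [h1, pv_chars_join_flatten sep.toList (groups.map (List.map String.toList))
        (by intro g hg
            rcases List.mem_map.mp hg with ⟨g', hg', rfl⟩
            simpa using h g' hg')]
  rw [← List.map_flatten]

-- flattened groups = uncategorized ++ buckets in sorted-category order
theorem pv_flatten_groups (s0 : List String) :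
    (pvGroups s0).flatten =
      pvUN s0 ++ (PySem.List.sorted (pvCats s0) (fun x => x) false).flatMap (pvBucket s0) := by
  unfold pvGroups
  rw [List.flatten_append, List.flatMap_def]
  split_ifs with h1 <;> simp [h1]

theorem pv_groups_ne_nil (s0 : List String) : ∀ g ∈ pvGroups s0, g ≠ [] := by
  intro g hg
  unfold pvGroups at hg
  rcases List.mem_append.mp hg with hl | hr
  · split_ifs at hl with h1
    · exact absurd hl (List.not_mem_nil)
    · rw [List.mem_singleton.mp hl]; exact h1
  · rcases List.mem_map.mp hr with ⟨c, hc, rfl⟩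
    have hc' : c ∈ pvCats s0 := (PySem.List.mem_sorted _ _ _ _).mp hc
    rcases List.mem_map.mp ((PySem.Set.mem_ofList _ _).mp hc') with ⟨t, ht, rfl⟩
    have : t ∈ pvBucket s0 (catOf t) := List.mem_filter.mpr ⟨ht, by simp⟩
    exact List.ne_nil_of_mem this

-- key-order facts
theorem pvK_le_un_un {a b : String} (ha : pvSlash a = false) (hb : pvSlash b = false)
    (hab : a ≤ b) : pvK a ≤ pvK b := by
  unfold pvSlash at ha hb
  simp at ha hb
  simp [pvK, bigKey, ha, hb, Prod.Lex.le_iff, hab]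
theorem pvK_le_un_sl {a b : String} (ha : pvSlash a = false) (hb : pvSlash b = true) :
    pvK a ≤ pvK b := by
  unfold pvSlash at ha hb
  simp at ha hb
  simp [pvK, bigKey, ha, hb, Prod.Lex.le_iff, Prod.Lex.lt_iff]
theorem pvK_le_same_cat {a b : String} (ha : pvSlash a = true) (hb : pvSlash b = true)
    (hc : catOf a = catOf b) (hab : a ≤ b) : pvK a ≤ pvK b := by
  unfold pvSlash at ha hb
  simp at ha hb
  simp [pvK, bigKey, ha, hb, Prod.Lex.le_iff, hc, hab]
theorem pvK_le_lt_cat {a b : String} (ha : pvSlash a = true) (hb : pvSlash b = true)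
    (hc : catOf a < catOf b) : pvK a ≤ pvK b := by
  unfold pvSlash at ha hb
  simp at ha hb
  simp [pvK, bigKey, ha, hb, Prod.Lex.le_iff, Prod.Lex.lt_iff, hc]
theorem pvK_inj : Function.Injective pvK := by
  intro a b h
  have h' : bigKey a = bigKey b ∧ a = b := by simpa [pvK] using h
  exact h'.2

-- the flattened result is a permutation of the input
theorem pv_perm_buckets : ∀ (cs : List String) (S : List String), cs.Nodup →
    (∀ t ∈ S, catOf t ∈ cs) →
    (cs.flatMap (fun c => S.filter (fun t => catOf t == c))).Perm S := by
  intro cs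
  induction cs with
  | nil =>
    intro S _ hall
    have hS : S = [] := List.eq_nil_iff_forall_not_mem.mpr (fun t ht => by simpa using hall t ht)
    simp [hS]
  | cons c cs ih =>
    intro S hnd hall
    rw [List.flatMap_cons]
    have hcongr : cs.flatMap (fun c' => S.filter (fun t => catOf t == c'))
        = cs.flatMap (fun c' => (S.filter (fun t => !(catOf t == c))).filter (fun t => catOf t == c')) := by
      apply List.flatMap_congr
      intro c' hc'
      rw [List.filter_filter]
      apply List.filter_congr
      intro t _
      have hne : c' ≠ c := fun h => ((List.nodup_cons.mp hnd).1 (h ▸ hc'))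
      by_cases h : catOf t = c' <;> simp [h, hne]
    have ihp := ih (S.filter (fun t => !(catOf t == c))) (List.nodup_cons.mp hnd).2
      (by intro t ht
          rcases List.mem_filter.mp ht with ⟨htS, htc⟩
          rcases List.mem_cons.mp (hall t htS) with h | h
          · simp [h] at htc
          · exact h)
    rw [hcongr]
    exact ((List.Perm.append_left _ ihp).trans (List.filter_append_perm _ S))

theorem pv_LA_perm (hashtags : List String) :
    (pvUN (PySem.List.sorted hashtags (fun x => x) false) ++
      (PySem.List.sorted (pvCats (PySem.List.sorted hashtags (fun x => x) false)) (fun x => x) false).flatMap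
        (pvBucket (PySem.List.sorted hashtags (fun x => x) false))).Perm hashtags := by
  set s0 := PySem.List.sorted hashtags (fun x => x) false with hs0
  have hnodup : (PySem.List.sorted (pvCats s0) (fun x => x) false).Nodup :=
    ((PySem.List.sorted_perm _ _ _).symm).nodup (PySem.Set.nodup_ofList _)
  have h1 : ((PySem.List.sorted (pvCats s0) (fun x => x) false).flatMap (pvBucket s0)).Perm (pvSL s0) := by
    unfold pvBucket
    apply pv_perm_buckets _ _ hnodup
    intro t ht
    rw [PySem.List.mem_sorted]
    exact (PySem.Set.mem_ofList _ _).mpr (List.mem_map_of_mem ht)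
  exact ((List.Perm.append_left (pvUN s0) h1).trans
    ((List.perm_append_comm).trans (List.filter_append_perm pvSlash s0))).trans
    (PySem.List.sorted_perm hashtags (fun x => x) false)

-- the flattened result is sorted under pvK
theorem pv_LA_pairwise (hashtags : List String) :
    (pvUN (PySem.List.sorted hashtags (fun x => x) false) ++
      (PySem.List.sorted (pvCats (PySem.List.sorted hashtags (fun x => x) false)) (fun x => x) false).flatMap
        (pvBucket (PySem.List.sorted hashtags (fun x => x) false))).Pairwise
      (fun a b => pvK a ≤ pvK b) := by
  set s0 := PySem.List.sorted hashtags (fun x => x) false with hs0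
  have hs0p : s0.Pairwise (fun a b => a ≤ b) := PySem.List.sorted_pairwise hashtags (fun x => x)
  have hmemUN : ∀ a ∈ pvUN s0, pvSlash a = false := by
    intro a ha
    have := (List.mem_filter.mp ha).2
    simpa using this
  have hmemB : ∀ c, ∀ a ∈ pvBucket s0 c, pvSlash a = true ∧ catOf a = c := by
    intro c a ha
    rcases List.mem_filter.mp ha with ⟨ha1, ha2⟩
    exact ⟨(List.mem_filter.mp ha1).2, by simpa using ha2⟩
  rw [List.pairwise_append]
  refine ⟨?_, ?_, ?_⟩
  · exact List.Pairwise.imp_of_mem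
      (fun ha hb hr => pvK_le_un_un (hmemUN _ ha) (hmemUN _ hb) hr)
      (List.Pairwise.sublist List.filter_sublist hs0p)
  · rw [List.flatMap_def, List.pairwise_flatten]
    constructor
    · intro l hl
      rcases List.mem_map.mp hl with ⟨c, hc, rfl⟩
      have hp : (pvBucket s0 c).Pairwise (fun a b => a ≤ b) :=
        List.Pairwise.sublist (List.Sublist.trans List.filter_sublist List.filter_sublist) hs0p
      exact List.Pairwise.imp_of_mem (fun ha hb hr =>
        pvK_le_same_cat (hmemB c _ ha).1 (hmemB c _ hb).1
          (((hmemB c _ ha).2).trans ((hmemB c _ hb).2).symm) hr) hp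
    · rw [List.pairwise_map]
      have hcats : (PySem.List.sorted (pvCats s0) (fun x => x) false).Pairwise (fun a b => a ≤ b) :=
        PySem.List.sorted_pairwise _ _
      have hnd : (PySem.List.sorted (pvCats s0) (fun x => x) false).Pairwise (fun a b => a ≠ b) :=
        ((PySem.List.sorted_perm _ _ _).symm).nodup (PySem.Set.nodup_ofList _)
      exact List.Pairwise.imp_of_mem (fun {c c'} _ _ hcc x hx y hy =>
        pvK_le_lt_cat (hmemB c x hx).1 (hmemB c' y hy).1
          (by rw [(hmemB c x hx).2, (hmemB c' y hy).2]
              exact lt_of_le_of_ne hcc.1 hcc.2)) (hcats.and hnd)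
  · intro a ha b hb
    rcases List.mem_flatMap.mp hb with ⟨c, hc, hbc⟩
    exact pvK_le_un_sl (hmemUN a ha) (hmemB c b hbc).1

-- B's two-component sorted2 is the single sort under the nested lexicographic key
theorem pv_sorted2_eq (xs : List String) :
    PySem.List.sorted2 xs bigKey (fun t => t) false = PySem.List.sorted xs pvK false := by
  rw [PySem.List.sorted_eq_foldl_insertBy]
  show xs.foldl (fun acc x => PySem.List.insertBy
      (fun a b => decide (bigKey a < bigKey b) || (!decide (bigKey b < bigKey a) && decide (a < b)))
      x acc) [] = _
  have hbef : (fun a b => decide (bigKey a < bigKey b) || (!decide (bigKey b < bigKey a) && decide (a < b)))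
      = (fun a b => decide (pvK a < pvK b)) := by
    funext a b
    have e : (pvK a < pvK b) ↔ (bigKey a < bigKey b ∨ (bigKey a = bigKey b ∧ a < b)) := by
      simp [pvK, Prod.Lex.lt_iff]
    by_cases h1 : bigKey a < bigKey b
    · simp [h1, e]
    · by_cases h2 : bigKey b < bigKey a
      · have hne : bigKey a ≠ bigKey b := fun h => absurd h2 (by simp [h])
        simp [h1, h2, e, hne]
      · have heq : bigKey a = bigKey b := le_antisymm (not_lt.mp h2) (not_lt.mp h1)
        by_cases h3 : a < b <;> simp [h3, e, heq]
  rw [hbef]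

-- ===== VERDICT (by name: the statement is the Claim_ definition above) =====
theorem format_obsidian_tags_section_spec : Claim_equal_format_obsidian_tags_section := by
  intro hashtags _
  show format_obsidian_tags_section hashtags = format_obsidian_tags_section_alt hashtags
  by_cases he : hashtags = []
  · subst he; rfl
  · rw [pvA_eq hashtags he]
    rw [pv_str_join_flatten " " _ (pv_groups_ne_nil _)]
    rw [pv_flatten_groups]
    unfold format_obsidian_tags_section_alt
    rw [pv_sorted2_eq]
    congr 1
    exact PySem.List.eq_of_perm_of_pairwise_le_of_injective pvK pvK_inj
      ((pv_LA_perm hashtags).trans (PySem.List.sorted_perm hashtags pvK false).symm)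
      (pv_LA_pairwise hashtags)
      (PySem.List.sorted_pairwise hashtags pvK)
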